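-- pv_equiv track=rewrite | github.com/kelmensonj/Warzone-SBMM-APP-Much-Improved | sbmmV5Wcomments.py | popper
-- ===== SOURCE A (Python) =====
-- def popper(player_list):
-- 	n = 100
-- 	split_list = [player_list[index : index + n] for index in range(0, len(player_list), n)]
-- 	scrape_list = []
-- 	for sub_list in split_list: #TODO: include this as a button so you can select a sample from the leaderboard for more in depth data scraping
-- 		player = sub_list.pop()
-- 		scrape_list.append(player) #this function isn't used for anything, but the intention is to allow you to scrape, say, every thousandth player on the leaderboard's match data
-- 	return scrape_list
-- ===== SOURCE B (Python) =====
-- def popper(player_list):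
--     scrape_list = []
--     rest = player_list
--     while len(rest) > 100:
--         scrape_list.append(rest[99])
--         rest = rest[100:]
--     if rest:
--         scrape_list.append(rest[-1])
--     return scrape_list
-- ===== Notes on version B (the rewrite author's own statement) =====
-- stated objective: simpler
-- what changed: Replaces A's two-stage build-a-list-of-100-chunks-then-pop-each with a single loop that walks the list 100 elements at a time, appending element 99 of the remainder (or its last element when at most 100 remain).
import Mathlib
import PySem

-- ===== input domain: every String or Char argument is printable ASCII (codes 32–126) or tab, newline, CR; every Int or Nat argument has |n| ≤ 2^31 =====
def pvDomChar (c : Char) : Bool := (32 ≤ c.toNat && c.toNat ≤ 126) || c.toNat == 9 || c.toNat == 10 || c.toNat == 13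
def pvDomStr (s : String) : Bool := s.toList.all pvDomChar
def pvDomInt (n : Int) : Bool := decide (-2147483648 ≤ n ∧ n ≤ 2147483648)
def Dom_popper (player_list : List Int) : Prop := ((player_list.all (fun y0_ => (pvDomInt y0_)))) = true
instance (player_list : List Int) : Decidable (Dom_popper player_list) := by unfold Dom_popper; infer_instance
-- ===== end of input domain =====

-- B replaces A's build-chunks-then-pop two-stage pass by a single loop that walks the
-- list 100 at a time, taking element 99 of the remainder and dropping 100 (objective: simpler).

-- ===== PORT A =====
def popper (player_list : List Int) : List Int :=
  let n : Int := 100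
  let split_list := (PySem.List.pyRange 0 (PySem.List.len player_list) n).map
      (fun index => PySem.List.slice player_list (some index) (some (index + n)))
  split_list.foldl (fun scrape_list sub_list =>
      match PySem.List.pop? sub_list with
      | some (player, _) => scrape_list ++ [player]
      | none => scrape_list) []   -- pop on an empty sublist never happens (chunks are nonempty)

-- ===== PORT B =====
def popperAltGo (rest scrape_list : List Int) : List Int :=
  if h : 100 < rest.length then
    popperAltGo (rest.drop 100) (scrape_list ++ [rest[99]'(by omega)])
  else if hne : rest ≠ [] then scrape_list ++ [rest.getLast hne]
  else scrape_list
termination_by rest.length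
decreasing_by simp; omega

def popper_alt (player_list : List Int) : List Int :=
  popperAltGo player_list []

-- ===== PRECONDITION & SPEC =====
def Spec_popper (player_list : List Int) (out : List Int) : Prop := out = popper_alt player_list
instance (player_list : List Int) (out : List Int) : Decidable (Spec_popper player_list out) := by unfold Spec_popper; infer_instance

-- ===== CLAIM (what is proved, stated in full; the proofs are below) =====
def Claim_equal_popper : Prop := ∀ (player_list : List Int), Dom_popper player_list → Spec_popper player_list (popper player_list)

-- ===== LEMMAS AND PROOFS =====

-- the accumulator of B's loop only ever grows on the right
theorem popperAltGo_acc (rest acc : List Int) :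
    popperAltGo rest acc = acc ++ popperAltGo rest [] := by
  induction hl : rest.length using Nat.strong_induction_on generalizing rest acc with
  | _ n ih =>
    rw [popperAltGo, popperAltGo]
    by_cases h : 100 < rest.length
    · simp only [h, dif_pos]
      rw [ih ((rest.drop 100).length) (by simp; omega) _ (acc ++ [rest[99]'(by omega)]) rfl,
          ih ((rest.drop 100).length) (by simp; omega) _ ([] ++ [rest[99]'(by omega)]) rfl]
      simp
    · simp only [h]
      by_cases hne : rest = [] <;> simp [hne]

-- A's fold appends, in order, the popped last element of each nonempty chunk
theorem foldA (l : List (List Int)) (acc : List Int) :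
    l.foldl (fun scrape_list sub_list =>
        match PySem.List.pop? sub_list with
        | some (player, _) => scrape_list ++ [player]
        | none => scrape_list) acc
      = acc ++ l.filterMap (fun s => (PySem.List.pop? s).map Prod.fst) := by
  induction l generalizing acc with
  | nil => simp
  | cons s l ih =>
    simp only [List.foldl_cons, List.filterMap_cons]
    cases hp : PySem.List.pop? s with
    | none => simp [ih]
    | some r => cases r; simp [ih]

theorem pop_fst_eq_getLast? (s : List Int) :
    (PySem.List.pop? s).map Prod.fst = s.getLast? := by
  rcases List.eq_nil_or_concat s with rfl | ⟨t, x, rfl⟩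
  · decide
  · rw [List.concat_eq_append, PySem.List.pop?_last]
    simp

-- A as chunks of 100: popper xs = the last elements of the ceil(len/100) chunks
theorem popper_chunks (xs : List Int) :
    popper xs = ((List.range ((xs.length + 99) / 100)).map
        (fun k => (xs.drop (100 * k)).take 100)).filterMap List.getLast? := by
  unfold popper
  rw [foldA, PySem.List.pyRange_of_pos 0 (PySem.List.len xs) (by norm_num)]
  simp only [List.map_map, List.filterMap_map, List.nil_append]
  have hcount : (if (0:Int) < PySem.List.len xs
      then ((PySem.List.len xs - 0 + 100 - 1) / 100).toNat else 0) = (xs.length + 99) / 100 := by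
    simp only [PySem.List.len_eq]
    split_ifs with h
    · have : ((xs.length : Int) - 0 + 100 - 1) / 100 = (((xs.length + 99) / 100 : Nat) : Int) := by
        omega
      rw [this, Int.toNat_natCast]
    · omega
  rw [hcount]
  apply List.filterMap_congr
  intro k _
  simp only [Function.comp]
  rw [pop_fst_eq_getLast?]
  congr 1
  rw [show (0 : Int) + 100 * (k : Int) = ((100 * k : Nat) : Int) by push_cast; ring,
      show ((100 * k : Nat) : Int) + 100 = ((100 * k + 100 : Nat) : Int) by push_cast; ring,
      PySem.List.slice_natCast]
  congr 1
  omega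

-- one step of the chunk decomposition when more than 100 elements remain
theorem chunks_step (xs : List Int) (h : 100 < xs.length) :
    (List.range ((xs.length + 99) / 100)).map (fun k => (xs.drop (100 * k)).take 100)
      = xs.take 100 ::
        (List.range (((xs.length - 100) + 99) / 100)).map
          (fun k => ((xs.drop 100).drop (100 * k)).take 100) := by
  have hm : (xs.length + 99) / 100 = ((xs.length - 100) + 99) / 100 + 1 := by omega
  rw [hm, List.range_succ_eq_map]
  simp only [List.map_cons, List.map_map, Nat.mul_zero, List.drop_zero]
  congr 1
  apply List.map_congr_left
  intro k _
  simp only [Function.comp, List.drop_drop]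
  congr 2
  omega

theorem main_eq (xs : List Int) : popper xs = popperAltGo xs [] := by
  induction hl : xs.length using Nat.strong_induction_on generalizing xs with
  | _ n ih =>
    subst hl
    rw [popperAltGo]
    by_cases h : 100 < xs.length
    · simp only [h, dif_pos]
      rw [popperAltGo_acc, List.nil_append,
          ← ih ((xs.drop 100).length) (by simp; omega) (xs.drop 100) rfl]
      have hlast : (xs.take 100).getLast? = some (xs[99]'(by omega)) := by
        have h100 : (xs.take 100).length = 100 := by simp; omega
        rw [List.getLast?_eq_getElem?, h100]
        simp only [List.getElem?_take]
        simp [List.getElem?_eq_getElem (by omega : 99 < xs.length)]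
      rw [popper_chunks, chunks_step xs h, List.filterMap_cons_some hlast,
          popper_chunks (xs.drop 100)]
      simp
    · simp only [h]
      by_cases hne : xs = []
      · subst hne; simp [popper_chunks]
      · simp only [List.nil_append]
        rw [popper_chunks]
        have hm : (xs.length + 99) / 100 = 1 := by
          have := List.length_pos_iff.mpr hne
          omega
        rw [hm]
        simp only [List.range_one, List.map_cons, List.map_nil, Nat.mul_zero,
          List.drop_zero, List.filterMap_cons, List.filterMap_nil]
        rw [List.take_of_length_le (by omega)]
        simp [List.getLast?_eq_some_getLast hne, hne]

-- ===== VERDICT (by name: the statement is the Claim_ definition above) =====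
theorem popper_spec : Claim_equal_popper := by
  intro xs _
  unfold Spec_popper popper_alt
  exact main_eq xs
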